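-- pv_equiv track=rewrite | github.com/KR70004526/Test-Code-Hub | TMotorControl/Test5.py | parse_map_multibus
-- ===== SOURCE A (Python) =====
-- from typing import Optional, Dict, List, Tuple, Any, Union
--
-- def parse_idmap_onebus(idmap: str, default_type: str) -> Dict[int, str]:
--     out: Dict[int,str] = {}
--     if not idmap: return out
--     for tok in idmap.split(","):
--         tok = tok.strip()
--         if not tok: continue
--         if ":" in tok:
--             i, t = tok.split(":",1)
--             out[int(i.strip())] = t.strip()
--         else:
--             out[int(tok)] = default_type
--     return out
--
-- def parse_map_multibus(map_str: str, default_type: str) -> Dict[str, Dict[int, str]]: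
--     out: Dict[str, Dict[int,str]] = {}
--     if not map_str: return out
--     for part in map_str.split(";"):
--         part = part.strip()
--         if not part: continue
--         if ":" not in part: raise ValueError(f"--map 형식 오류: {part}")
--         bus, ids = part.split(":",1)
--         out[bus.strip()] = parse_idmap_onebus(ids, default_type)
--     return out
-- ===== SOURCE B (Python) =====
-- def _add_token(cur, raw, default_type):
--     t = raw.strip()
--     if not t:
--         return
--     i, sep, r = t.partition(":")
--     if sep:
--         cur[int(i.strip())] = r.strip()
--     else:
--         cur[int(t)] = default_type
--
--
-- def parse_map_multibus(map_str: str, default_type: str) -> dict: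
--     # single left-to-right pass over the characters; no split() calls
--     out = {}
--     bus = None   # None: still reading the bus name of the current part
--     cur = {}     # ids collected so far for the current part
--     buf = ""     # characters of the current token / bus name / whole part
--     for ch in map_str + ";":
--         if ch == ";":
--             if bus is None:
--                 p = buf.strip()
--                 if p:
--                     raise ValueError(f"--map 형식 오류: {p}")
--             else:
--                 _add_token(cur, buf, default_type)
--                 out[bus.strip()] = cur
--             bus, cur, buf = None, {}, ""
--         elif ch == ":" and bus is None:
--             bus, buf = buf, ""
--         elif ch == "," and bus is not None:
--             _add_token(cur, buf, default_type)
--             buf = ""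
--         else:
--             buf += ch
--     return out
-- ===== Notes on version B (the rewrite author's own statement) =====
-- stated objective: alternative
-- what changed: B replaces A's split()-based processing (split on ';', helper call, split on ',' and ':') by a single left-to-right character scan: a small state machine over map_str+';' that tracks (bus, current dict, buffer) and flushes on ';', ':' and ',' delimiters, with no split calls and no helper pass over the id list.
import Mathlib
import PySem

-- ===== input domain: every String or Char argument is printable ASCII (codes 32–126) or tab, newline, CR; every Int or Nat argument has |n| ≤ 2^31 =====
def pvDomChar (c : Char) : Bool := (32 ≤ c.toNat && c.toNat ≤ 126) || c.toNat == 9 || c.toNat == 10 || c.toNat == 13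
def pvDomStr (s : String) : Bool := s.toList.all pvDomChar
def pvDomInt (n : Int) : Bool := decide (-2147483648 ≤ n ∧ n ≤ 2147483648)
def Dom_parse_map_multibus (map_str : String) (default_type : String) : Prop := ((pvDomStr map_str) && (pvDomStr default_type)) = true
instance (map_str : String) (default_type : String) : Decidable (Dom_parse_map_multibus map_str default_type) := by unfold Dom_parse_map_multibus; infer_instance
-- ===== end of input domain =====

-- B replaces A's split()-based two-level loops by a single left-to-right character scan
-- (a small state machine, no split calls); objective: alternative, same O(n) cost.
-- A and B raise the same ValueErrors (non-blank part without ':', non-integer id): those inputs are outside Pre_.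

-- shared single-character splitting helpers (used by the B port's hand-ported
-- partition and by Pre_; they are not either port)
-- split1 c l = l.partition(c) for a one-character separator, as (before, after-first-c?)
def split1 (c : Char) : List Char → List Char × Option (List Char)
  | [] => ([], none)
  | a :: l =>
    if a = c then ([], some l)
    else
      let p := split1 c l
      (a :: p.1, p.2)

-- splitc c l = l.split(c) for a one-character separator
def splitc (c : Char) : List Char → List (List Char)
  | [] => [[]]
  | a :: l =>
    if a = c then [] :: splitc c l
    else
      match splitc c l with
      | h :: t => (a :: h) :: t
      | [] => [[a]]   -- unreachable: splitc never returns []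

-- ===== PORT A =====
-- loop body of parse_idmap_onebus, after 'tok = tok.strip(); if not tok: continue'
def pvTokStepA (default_type : String) (out : PySem.Dict Int String) (tok : String) : PySem.Dict Int String :=
  if PySem.Str.isIn ":" tok then
    match PySem.Str.splitMax? tok ":" 1 with
    | some (i :: t :: _) =>
      match PySem.Int.ofStr? (PySem.Str.strip i) with
      | some n => out.insert n (PySem.Str.strip t)
      | none => out   -- int() raises ValueError here: excluded by Pre_
    | _ => out        -- unreachable: ':' is in tok, so split(":",1) yields two pieces
  else
    match PySem.Int.ofStr? tok with
    | some n => out.insert n default_type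
    | none => out     -- int() raises ValueError here: excluded by Pre_

def parse_idmap_onebus (idmap : String) (default_type : String) : PySem.Dict Int String :=
  if idmap = "" then PySem.Dict.empty
  else ((PySem.Str.split? idmap ",").getD []).foldl (fun out tok0 =>
    let tok := PySem.Str.strip tok0
    if tok = "" then out else pvTokStepA default_type out tok) PySem.Dict.empty

-- loop body of parse_map_multibus, after 'part = part.strip(); if not part: continue'
def pvPartStepA (default_type : String) (out : PySem.Dict String (List (Int × String))) (part : String) :
    PySem.Dict String (List (Int × String)) :=
  if PySem.Str.isIn ":" part then
    match PySem.Str.splitMax? part ":" 1 with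
    | some (bus :: ids :: _) =>
      out.insert (PySem.Str.strip bus) (parse_idmap_onebus ids default_type).items
    | _ => out      -- unreachable: ':' is in part
  else out          -- Python raises ValueError here: excluded by Pre_

def parse_map_multibus (map_str : String) (default_type : String) : List (String × List (Int × String)) :=
  (if map_str = "" then (PySem.Dict.empty : PySem.Dict String (List (Int × String)))
   else ((PySem.Str.split? map_str ";").getD []).foldl (fun out part0 =>
     let part := PySem.Str.strip part0
     if part = "" then out else pvPartStepA default_type out part) PySem.Dict.empty).items

-- ===== PORT B =====
-- port of _add_token (strip, partition(":") — ported by hand via split1, exact for the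
-- one-character separator ':' — int(), dict assignment)
def pvAddTok (default_type : String) (cur : PySem.Dict Int String) (raw : List Char) : PySem.Dict Int String :=
  let t := PySem.Chars.strip raw
  if t = [] then cur
  else
    match split1 ':' t with
    | (i, some r) =>
      match PySem.Int.ofChars? (PySem.Chars.strip i) with
      | some n => cur.insert n (String.ofList (PySem.Chars.strip r))
      | none => cur   -- int() raises ValueError: excluded by Pre_
    | (_, none) =>
      match PySem.Int.ofChars? t with
      | some n => cur.insert n default_type
      | none => cur   -- int() raises ValueError: excluded by Pre_

-- one step of B's scan; state = (out, bus (None while reading the bus name), cur, buf)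
def pvScanStep (default_type : String)
    (st : PySem.Dict String (List (Int × String)) × Option (List Char) × PySem.Dict Int String × List Char)
    (ch : Char) :
    PySem.Dict String (List (Int × String)) × Option (List Char) × PySem.Dict Int String × List Char :=
  match st with
  | (out, none, cur, buf) =>
    if ch = ';' then (out, none, PySem.Dict.empty, [])
      -- Python raises ValueError when buf.strip() is non-empty: excluded by Pre_
    else if ch = ':' then (out, some buf, PySem.Dict.empty, [])
    else (out, none, cur, buf ++ [ch])
  | (out, some bus, cur, buf) =>
    if ch = ';' then
      (out.insert (String.ofList (PySem.Chars.strip bus)) (pvAddTok default_type cur buf).items,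
       none, PySem.Dict.empty, [])
    else if ch = ',' then (out, some bus, pvAddTok default_type cur buf, [])
    else (out, some bus, cur, buf ++ [ch])

def parse_map_multibus_alt (map_str : String) (default_type : String) : List (String × List (Int × String)) :=
  ((map_str.toList ++ [';']).foldl (pvScanStep default_type)
    (PySem.Dict.empty, none, PySem.Dict.empty, [])).1.items

-- ===== PRECONDITION & SPEC =====
-- Pre_ excludes exactly the inputs on which the Python raises: a non-blank ';'-part without ':'
-- (the explicit ValueError) and id tokens whose integer field is not int()-parsable (ValueError).
def pvTokOk (t : List Char) : Bool :=
  let u := PySem.Chars.strip t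
  u.isEmpty ||
    (match split1 ':' u with
     | (i, some _) => (PySem.Int.ofChars? (PySem.Chars.strip i)).isSome
     | (_, none) => (PySem.Int.ofChars? u).isSome)

def pvPartOk (p : List Char) : Bool :=
  let q := PySem.Chars.strip p
  q.isEmpty ||
    (match split1 ':' q with
     | (_, some ids) => (splitc ',' ids).all pvTokOk
     | (_, none) => false)

def Pre_parse_map_multibus (map_str : String) (default_type : String) : Prop :=
  ((splitc ';' map_str.toList).all pvPartOk) = true

instance (map_str : String) (default_type : String) : Decidable (Pre_parse_map_multibus map_str default_type) := by
  unfold Pre_parse_map_multibus; infer_instance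

def pvWitness_parse_map_multibus : String × String := ("can0: 1:a, 2 ;can1:3", "srv")

def Spec_parse_map_multibus (map_str : String) (default_type : String) (out : List (String × List (Int × String))) : Prop := out = parse_map_multibus_alt map_str default_type
instance (map_str : String) (default_type : String) (out : List (String × List (Int × String))) : Decidable (Spec_parse_map_multibus map_str default_type out) := by unfold Spec_parse_map_multibus; infer_instance

-- ===== CLAIM (what is proved, stated in full; the proofs are below) =====
def Claim_equal_parse_map_multibus : Prop := ∀ (map_str : String) (default_type : String), Dom_parse_map_multibus map_str default_type → Pre_parse_map_multibus map_str default_type → Spec_parse_map_multibus map_str default_type (parse_map_multibus map_str default_type)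

-- ===== LEMMAS AND PROOFS =====

-- canonical middle form, Chars level: both ports are proved equal to it
def pvPartC (d : String) (out : PySem.Dict String (List (Int × String))) (p : List Char) :
    PySem.Dict String (List (Int × String)) :=
  let q := PySem.Chars.strip p
  if q = [] then out
  else
    match split1 ':' q with
    | (bus, some ids) =>
      out.insert (String.ofList (PySem.Chars.strip bus))
        ((splitc ',' ids).foldl (pvAddTok d) PySem.Dict.empty).items
    | (_, none) => out

def pvMultC (d : String) (out : PySem.Dict String (List (Int × String))) (l : List Char) :
    PySem.Dict String (List (Int × String)) :=
  (splitc ';' l).foldl (pvPartC d) out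

-- ---- splitc / split1 / strip infrastructure ----
theorem splitc_ne_nil (c : Char) (l : List Char) : splitc c l ≠ [] := by
  induction l with
  | nil => simp [splitc]
  | cons a l ih =>
    by_cases h : a = c
    · simp [splitc, h]
    · simp only [splitc, h, if_false]
      rcases e : splitc c l with _ | ⟨x, t⟩ <;> simp

theorem splitc_no_sep (c : Char) (l : List Char) (h : c ∉ l) : splitc c l = [l] := by
  induction l with
  | nil => rfl
  | cons a l ih =>
    simp only [List.mem_cons, not_or] at h
    simp [splitc, (Ne.symm h.1 : a ≠ c), ih h.2]

theorem splitc_append_sep (c : Char) (a l : List Char) (h : c ∉ a) :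
    splitc c (a ++ c :: l) = a :: splitc c l := by
  induction a with
  | nil => simp [splitc]
  | cons x a ih =>
    simp only [List.mem_cons, not_or] at h
    simp only [List.cons_append, splitc, if_neg (Ne.symm h.1 : x ≠ c), ih h.2]

theorem split1_none (c : Char) (l : List Char) (h : c ∉ l) : split1 c l = (l, none) := by
  induction l with
  | nil => rfl
  | cons a l ih =>
    simp only [List.mem_cons, not_or] at h
    simp [split1, (Ne.symm h.1 : a ≠ c), ih h.2]

theorem split1_append (c : Char) (a l : List Char) (h : c ∉ a) :
    split1 c (a ++ c :: l) = (a, some l) := by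
  induction a with
  | nil => simp [split1]
  | cons x a ih =>
    simp only [List.mem_cons, not_or] at h
    simp [split1, (Ne.symm h.1 : x ≠ c), ih h.2]

theorem split1_some_decomp (c : Char) (l : List Char) :
    ∀ h r, split1 c l = (h, some r) → l = h ++ c :: r ∧ c ∉ h := by
  induction l with
  | nil => intro h r e; simp [split1] at e
  | cons a l ih =>
    intro h r e
    by_cases hac : a = c
    · simp [split1, hac] at e
      subst hac
      simp [e.1, ← e.2]
    · simp [split1, hac] at e
      rcases e1 : split1 c l with ⟨h', r'⟩
      rw [e1] at e
      cases r' with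
      | none => rw [e1] at *; simp at e
      | some rr =>
        simp at e
        obtain ⟨hh, hr⟩ := ih h' rr e1
        subst hh
        constructor
        · rw [← e.1, ← e.2]; simp
        · rw [← e.1]; simp [hr]; exact fun hh => hac hh.symm

theorem split1_none_decomp (c : Char) (l : List Char) :
    ∀ h, split1 c l = (h, none) → h = l ∧ c ∉ l := by
  induction l with
  | nil => intro h e; simp [split1] at e; simp [e]
  | cons a l ih =>
    intro h e
    by_cases hac : a = c
    · simp [split1, hac] at e
    · simp [split1, hac] at e
      rcases e1 : split1 c l with ⟨h', r'⟩
      rw [e1] at e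
      cases r' with
      | some rr => rw [e1] at *; simp at e
      | none =>
        simp at e
        obtain ⟨hh, hr⟩ := ih h' e1
        subst hh
        refine ⟨e.symm, ?_⟩
        simp [hr]
        exact fun hh => hac hh.symm

theorem splitOn_go_single (c : Char) : ∀ (fuel : Nat) (l cur : List Char) (acc : List (List Char)),
    l.length < fuel →
    PySem.Chars.splitOn.go [c] fuel l cur acc
      = acc.reverse ++ (match splitc c l with
                        | h :: t => (cur.reverse ++ h) :: t
                        | [] => []) := by
  intro fuel
  induction fuel with
  | zero => intro l cur acc h; omega
  | succ f ih =>
    intro l cur acc h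
    cases l with
    | nil =>
      rw [PySem.Chars.splitOn.go.eq_def]
      simp [splitc]
    | cons a rest =>
      rw [PySem.Chars.splitOn.go.eq_def]
      rcases e : splitc c rest with _ | ⟨h', t'⟩
      · exact absurd e (splitc_ne_nil c rest)
      by_cases hac : a = c
      · subst hac
        simp only [List.isPrefixOf, beq_self_eq_true, Bool.true_and, if_true]
        simp only [List.length_cons, List.length_nil, List.drop_succ_cons, List.drop_zero]
        rw [ih rest [] (cur.reverse :: acc) (by simp at h ⊢; omega)]
        simp [splitc, e]
      · have : ([c].isPrefixOf (a :: rest)) = false := by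
          simp [List.isPrefixOf]; exact fun hh => hac hh.symm
        simp only [this, Bool.false_eq_true, if_false]
        rw [ih rest (a :: cur) acc (by simp at h ⊢; omega)]
        simp [splitc, hac, e]

theorem splitOn_single (c : Char) (l : List Char) :
    PySem.Chars.splitOn l [c] = splitc c l := by
  unfold PySem.Chars.splitOn
  rw [splitOn_go_single c (l.length + 1) l [] [] (by omega)]
  rcases e : splitc c l with _ | ⟨h', t'⟩
  · exact absurd e (splitc_ne_nil c l)
  · simp

theorem splitMax_go_zero (sep : List Char) (fuel : Nat) (l cur : List Char) (acc : List (List Char)) :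
    PySem.Chars.splitOnMax.go sep fuel 0 l cur acc = ((cur.reverse ++ l) :: acc).reverse := by
  cases fuel with
  | zero => rw [PySem.Chars.splitOnMax.go.eq_def]
  | succ f =>
    cases l with
    | nil => rw [PySem.Chars.splitOnMax.go.eq_def]; simp
    | cons a rest => rw [PySem.Chars.splitOnMax.go.eq_def]; simp

theorem splitMax_go_one (c : Char) : ∀ (fuel : Nat) (l cur : List Char) (acc : List (List Char)),
    l.length < fuel →
    PySem.Chars.splitOnMax.go [c] fuel 1 l cur acc
      = acc.reverse ++ (match split1 c l with
                        | (h, none) => [cur.reverse ++ h]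
                        | (h, some r) => [cur.reverse ++ h, r]) := by
  intro fuel
  induction fuel with
  | zero => intro l cur acc h; omega
  | succ f ih =>
    intro l cur acc h
    cases l with
    | nil =>
      rw [PySem.Chars.splitOnMax.go.eq_def]
      simp [split1]
    | cons a rest =>
      rw [PySem.Chars.splitOnMax.go.eq_def]
      by_cases hac : a = c
      · subst hac
        simp only [if_neg (Nat.one_ne_zero), List.isPrefixOf, beq_self_eq_true, Bool.true_and, if_true]
        simp only [List.length_cons, List.length_nil, List.drop_succ_cons, List.drop_zero]
        rw [splitMax_go_zero]
        simp [split1]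
      · have hp : ([c].isPrefixOf (a :: rest)) = false := by
          simp [List.isPrefixOf]; exact fun hh => hac hh.symm
        simp only [hp, Bool.false_eq_true, if_false]
        rcases e : split1 c rest with ⟨h', r'⟩
        simp only [if_neg (Nat.one_ne_zero)]
        rw [ih rest (a :: cur) acc (by simp at h ⊢; omega)]
        cases r' <;> simp [split1, hac, e]

theorem splitMax1_single (c : Char) (l : List Char) :
    PySem.Chars.splitMax? l [c] 1 =
      some (match split1 c l with
            | (h, none) => [h]
            | (h, some r) => [h, r]) := by
  unfold PySem.Chars.splitMax? PySem.Chars.splitOnMax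
  rw [if_neg (by simp), if_neg (by norm_num)]
  rw [show ((1:Int).toNat) = 1 from rfl]
  rw [splitMax_go_one c (l.length + 1) l [] [] (by omega)]
  rcases e : split1 c l with ⟨h', r'⟩
  cases r' <;> simp

theorem lstrip_append_cons (u v : List Char) (a : Char) (ha : PySem.Chars.isspace a = false) :
    PySem.Chars.lstrip (u ++ a :: v) = PySem.Chars.lstrip u ++ a :: v := by
  unfold PySem.Chars.lstrip
  rw [List.dropWhile_append]
  by_cases h : (List.dropWhile PySem.Chars.isspace u).isEmpty = true
  · rw [if_pos h, List.dropWhile_cons, if_neg (by simp [ha])]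
    rw [List.isEmpty_iff] at h
    rw [h]; rfl
  · rw [if_neg h]

theorem rstrip_append_cons (u v : List Char) (a : Char) (ha : PySem.Chars.isspace a = false) :
    PySem.Chars.rstrip (u ++ a :: v) = u ++ a :: PySem.Chars.rstrip v := by
  unfold PySem.Chars.rstrip
  rw [show (u ++ a :: v).reverse = v.reverse ++ a :: u.reverse by simp]
  rw [List.dropWhile_append]
  by_cases h : (List.dropWhile PySem.Chars.isspace v.reverse).isEmpty = true
  · rw [if_pos h, List.dropWhile_cons, if_neg (by simp [ha])]
    rw [List.isEmpty_iff] at h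
    rw [h]
    simp
  · rw [if_neg h]
    simp

theorem rstrip_cons_nonspace (v : List Char) (a : Char) (ha : PySem.Chars.isspace a = false) :
    PySem.Chars.rstrip (a :: v) = a :: PySem.Chars.rstrip v :=
  rstrip_append_cons [] v a ha

theorem strip_append_cons (u v : List Char) (a : Char) (ha : PySem.Chars.isspace a = false) :
    PySem.Chars.strip (u ++ a :: v) = PySem.Chars.lstrip u ++ a :: PySem.Chars.rstrip v := by
  unfold PySem.Chars.strip
  rw [lstrip_append_cons u v a ha, rstrip_append_cons _ v a ha]

theorem lstrip_lstrip (l : List Char) : PySem.Chars.lstrip (PySem.Chars.lstrip l) = PySem.Chars.lstrip l := by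
  unfold PySem.Chars.lstrip
  induction l with
  | nil => rfl
  | cons a l ih =>
    by_cases h : PySem.Chars.isspace a = true
    · simp [List.dropWhile_cons, h, ih]
    · simp only [List.dropWhile_cons, h]
      simp at h
      simp [h]

theorem rstrip_rstrip (l : List Char) : PySem.Chars.rstrip (PySem.Chars.rstrip l) = PySem.Chars.rstrip l := by
  unfold PySem.Chars.rstrip
  rw [List.reverse_reverse]
  have := lstrip_lstrip l.reverse
  unfold PySem.Chars.lstrip at this
  rw [this]

theorem rstrip_eq_nil_lstrip (v : List Char) (h : PySem.Chars.rstrip v = []) : PySem.Chars.lstrip v = [] := by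
  unfold PySem.Chars.rstrip at h
  unfold PySem.Chars.lstrip
  rw [List.dropWhile_eq_nil_iff]
  have h2 : List.dropWhile PySem.Chars.isspace v.reverse = [] := by
    cases e : List.dropWhile PySem.Chars.isspace v.reverse with
    | nil => rfl
    | cons x t => rw [e] at h; simp at h
  rw [List.dropWhile_eq_nil_iff] at h2
  intro x hx
  exact h2 x (by simp [hx])

theorem rstrip_cons_space (v : List Char) (a : Char) (ha : PySem.Chars.isspace a = true) :
    PySem.Chars.rstrip (a :: v)
      = if PySem.Chars.rstrip v = [] then [] else a :: PySem.Chars.rstrip v := by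
  unfold PySem.Chars.rstrip
  rw [show (a :: v).reverse = v.reverse ++ [a] by simp]
  rw [List.dropWhile_append]
  by_cases h : (List.dropWhile PySem.Chars.isspace v.reverse).isEmpty = true
  · rw [if_pos h]
    rw [List.isEmpty_iff] at h
    rw [if_pos (by rw [h]; rfl)]
    simp [List.dropWhile_cons, ha]
  · rw [if_neg h]
    rw [List.isEmpty_iff] at h
    rw [if_neg (by simpa using h)]
    simp

theorem lstrip_cons_space (v : List Char) (a : Char) (ha : PySem.Chars.isspace a = true) :
    PySem.Chars.lstrip (a :: v) = PySem.Chars.lstrip v := by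
  unfold PySem.Chars.lstrip; simp [List.dropWhile_cons, ha]

theorem lstrip_cons_nonspace (v : List Char) (a : Char) (ha : PySem.Chars.isspace a = false) :
    PySem.Chars.lstrip (a :: v) = a :: v := by
  unfold PySem.Chars.lstrip; simp [List.dropWhile_cons, ha]

theorem lstrip_rstrip_comm (l : List Char) :
    PySem.Chars.lstrip (PySem.Chars.rstrip l) = PySem.Chars.rstrip (PySem.Chars.lstrip l) := by
  induction l with
  | nil => rfl
  | cons a v ih =>
    by_cases ha : PySem.Chars.isspace a = true
    · rw [lstrip_cons_space v a ha, rstrip_cons_space v a ha]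
      by_cases hv : PySem.Chars.rstrip v = []
      · rw [if_pos hv]
        have h2 := rstrip_eq_nil_lstrip v hv
        rw [h2]
        rfl
      · rw [if_neg hv, lstrip_cons_space _ a ha, ih]
    · simp at ha
      rw [lstrip_cons_nonspace v a ha, rstrip_cons_nonspace v a ha,
          lstrip_cons_nonspace _ a ha]

theorem strip_lstrip (l : List Char) : PySem.Chars.strip (PySem.Chars.lstrip l) = PySem.Chars.strip l := by
  unfold PySem.Chars.strip
  rw [lstrip_lstrip]

theorem strip_rstrip (l : List Char) : PySem.Chars.strip (PySem.Chars.rstrip l) = PySem.Chars.strip l := by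
  unfold PySem.Chars.strip
  rw [lstrip_rstrip_comm, rstrip_rstrip]

theorem strip_strip (l : List Char) : PySem.Chars.strip (PySem.Chars.strip l) = PySem.Chars.strip l := by
  conv_lhs => rw [show PySem.Chars.strip l = PySem.Chars.rstrip (PySem.Chars.lstrip l) from rfl]
  rw [strip_rstrip, strip_lstrip]

theorem mem_lstrip (l : List Char) (x : Char) (h : x ∈ PySem.Chars.lstrip l) : x ∈ l :=
  List.Sublist.mem h (List.dropWhile_sublist _)

theorem mem_rstrip (l : List Char) (x : Char) (h : x ∈ PySem.Chars.rstrip l) : x ∈ l := by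
  unfold PySem.Chars.rstrip at h
  simp only [List.mem_reverse] at h
  exact by simpa using List.Sublist.mem h (List.dropWhile_sublist _)

theorem mem_strip (l : List Char) (x : Char) (h : x ∈ PySem.Chars.strip l) : x ∈ l :=
  mem_lstrip l x (mem_rstrip _ x h)

theorem splitc_cons_sep (c : Char) (l : List Char) : splitc c (c :: l) = [] :: splitc c l := by
  simp [splitc]

theorem splitc_cons_ne (c a : Char) (l h : List Char) (t : List (List Char))
    (hac : ¬ a = c) (e : splitc c l = h :: t) : splitc c (a :: l) = (a :: h) :: t := by
  simp [splitc, hac, e]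

theorem splitc_singleton (c : Char) (l : List Char) :
    ∀ h, splitc c l = [h] → h = l := by
  induction l with
  | nil => intro h e; simp [splitc] at e; simp [e]
  | cons a l ih =>
    intro h e
    by_cases hac : a = c
    · subst hac
      rw [splitc_cons_sep] at e
      simp at e
      exact absurd e.2 (splitc_ne_nil a l)
    · rcases e1 : splitc c l with _ | ⟨h₀, t₀⟩
      · exact absurd e1 (splitc_ne_nil c l)
      rw [splitc_cons_ne c a l h₀ t₀ hac e1] at e
      simp at e
      rw [e.2] at e1
      rw [ih h₀ e1] at e
      simp [e.1]

theorem rstrip_eq_nil_iff (v : List Char) :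
    PySem.Chars.rstrip v = [] ↔ ∀ x ∈ v, PySem.Chars.isspace x = true := by
  unfold PySem.Chars.rstrip
  constructor
  · intro h x hx
    have h2 : List.dropWhile PySem.Chars.isspace v.reverse = [] := by
      cases e : List.dropWhile PySem.Chars.isspace v.reverse with
      | nil => rfl
      | cons y t => rw [e] at h; simp at h
    rw [List.dropWhile_eq_nil_iff] at h2
    exact h2 x (by simp [hx])
  · intro h
    have : List.dropWhile PySem.Chars.isspace v.reverse = [] := by
      rw [List.dropWhile_eq_nil_iff]
      intro x hx
      exact h x (by simpa using hx)
    rw [this]; rfl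

theorem splitc_rstrip (c : Char) (l : List Char) (hc : PySem.Chars.isspace c = false) :
    splitc c (PySem.Chars.rstrip l) =
      (splitc c l).dropLast ++ [PySem.Chars.rstrip ((splitc c l).getLastD [])] := by
  induction l with
  | nil => rfl
  | cons a h' ih =>
    rcases e : splitc c h' with _ | ⟨h₀, t₀⟩
    · exact absurd e (splitc_ne_nil c h')
    by_cases hac : a = c
    · -- a = c, c is non-space
      subst hac
      rw [rstrip_cons_nonspace h' a hc, splitc_cons_sep, splitc_cons_sep, ih, e]
      rw [List.dropLast_cons_of_ne_nil (List.cons_ne_nil h₀ t₀)]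
      simp [List.getLastD_cons]
    · -- a ≠ c
      by_cases hr : PySem.Chars.rstrip h' = []
      · have hall : ∀ x ∈ h', PySem.Chars.isspace x = true := (rstrip_eq_nil_iff h').mp hr
        have hcn : c ∉ h' := fun hmem => by rw [hall c hmem] at hc; exact absurd hc (by simp)
        have e' : splitc c h' = [h'] := splitc_no_sep c h' hcn
        have hcn2 : c ∉ a :: h' := by
          simp [hcn]; exact fun hh => hac hh.symm
        have e2 : splitc c (a :: h') = [a :: h'] := splitc_no_sep c _ hcn2
        by_cases ha : PySem.Chars.isspace a = true
        · rw [rstrip_cons_space h' a ha, if_pos hr, e2]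
          have : PySem.Chars.rstrip (a :: h') = [] :=
            (rstrip_eq_nil_iff _).mpr (by intro x hx; rcases List.mem_cons.mp hx with h1 | h1
                                          · rw [h1]; exact ha
                                          · exact hall x h1)
          simp [this, splitc]
        · simp at ha
          rw [rstrip_cons_nonspace h' a ha, hr, e2]
          have : splitc c [a] = [[a]] := splitc_no_sep c [a] (by simp; exact fun hh => hac hh.symm)
          rw [this]
          have h3 : PySem.Chars.rstrip (a :: h') = [a] := by
            rw [rstrip_cons_nonspace h' a ha, hr]
          simp [h3]
      · have ha2 : PySem.Chars.rstrip (a :: h') = a :: PySem.Chars.rstrip h' := by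
          by_cases ha : PySem.Chars.isspace a = true
          · rw [rstrip_cons_space h' a ha, if_neg hr]
          · exact rstrip_cons_nonspace h' a (by simpa using ha)
        rw [ha2]
        rw [e] at ih
        cases t₀ with
        | nil =>
          have hh : h₀ = h' := splitc_singleton c h' h₀ e
          subst hh
          simp only [List.getLastD_cons, List.getLastD_nil, List.nil_append,
            show ∀ x : List Char, [x].dropLast = [] from fun _ => rfl] at ih
          rw [splitc_cons_ne c a _ _ _ hac ih]
          rw [splitc_cons_ne c a h₀ h₀ [] hac e]
          simp only [List.getLastD_cons, List.getLastD_nil, List.nil_append,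
            show ∀ x : List Char, [x].dropLast = [] from fun _ => rfl]
          rw [ha2]
        | cons s t =>
          rw [List.dropLast_cons_of_ne_nil (List.cons_ne_nil s t)] at ih
          rw [splitc_cons_ne c a _ _ _ hac ih]
          rw [splitc_cons_ne c a h' h₀ (s :: t) hac e]
          rw [List.dropLast_cons_of_ne_nil (List.cons_ne_nil s t)]
          simp [List.getLastD_cons]

-- ---- pvAddTok facts ----
theorem addTok_strip (d : String) (cur : PySem.Dict Int String) (raw : List Char) :
    pvAddTok d cur (PySem.Chars.strip raw) = pvAddTok d cur raw := by
  simp only [pvAddTok, strip_strip]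

theorem foldl_addTok_congr (d : String) (l₁ l₂ : List (List Char))
    (h : l₁.map PySem.Chars.strip = l₂.map PySem.Chars.strip) (cur : PySem.Dict Int String) :
    l₁.foldl (pvAddTok d) cur = l₂.foldl (pvAddTok d) cur := by
  induction l₁ generalizing l₂ cur with
  | nil => cases l₂ with
    | nil => rfl
    | cons b t => simp at h
  | cons a t ih =>
    cases l₂ with
    | nil => simp at h
    | cons b t₂ =>
      simp only [List.map_cons, List.cons.injEq] at h
      simp only [List.foldl_cons]
      rw [show pvAddTok d cur a = pvAddTok d cur b by
            rw [← addTok_strip d cur a, ← addTok_strip d cur b, h.1]]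
      exact ih t₂ h.2 _

-- ---- the scanner equals the canonical form ----
theorem dropLast_getLastD {α : Type} (S : List α) (dflt : α) (h : S ≠ []) :
    S.dropLast ++ [S.getLastD dflt] = S := by
  induction S generalizing dflt with
  | nil => exact absurd rfl h
  | cons x t ih =>
    cases t with
    | nil => rfl
    | cons y u =>
      rw [List.dropLast_cons_of_ne_nil (List.cons_ne_nil y u), List.getLastD_cons]
      simp only [List.cons_append, List.cons.injEq, true_and]
      exact ih x (List.cons_ne_nil y u)

theorem foldl_addTok_rstrip (d : String) (hh : List Char) (cur : PySem.Dict Int String) :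
    (splitc ',' (PySem.Chars.rstrip hh)).foldl (pvAddTok d) cur
      = (splitc ',' hh).foldl (pvAddTok d) cur := by
  rw [splitc_rstrip ',' hh (by decide)]
  apply foldl_addTok_congr
  conv_rhs => rw [← dropLast_getLastD (splitc ',' hh) [] (splitc_ne_nil ',' hh)]
  simp [strip_rstrip]

theorem pvPartC_no_colon (d : String) (out : PySem.Dict String (List (Int × String)))
    (p : List Char) (h : ':' ∉ p) : pvPartC d out p = out := by
  unfold pvPartC
  by_cases hq : PySem.Chars.strip p = []
  · rw [if_pos hq]
  · rw [if_neg hq]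
    rw [split1_none ':' _ (fun hm => h (mem_strip p ':' hm))]

theorem pvPartC_colon (d : String) (out : PySem.Dict String (List (Int × String)))
    (buf hh : List Char) (hb : ':' ∉ buf) :
    pvPartC d out (buf ++ ':' :: hh)
      = out.insert (String.ofList (PySem.Chars.strip buf))
          ((splitc ',' hh).foldl (pvAddTok d) PySem.Dict.empty).items := by
  unfold pvPartC
  rw [strip_append_cons buf hh ':' (by decide)]
  rw [if_neg (by simp)]
  rw [split1_append ':' _ _ (fun hm => hb (mem_lstrip buf ':' hm))]
  simp only [strip_lstrip, foldl_addTok_rstrip]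

-- inner run: chars without ';' processed from a some-state
theorem pvScanInner (d : String) (h : List Char) :
    ∀ (out : PySem.Dict String (List (Int × String))) (bus : List Char)
      (cur : PySem.Dict Int String) (buf : List Char), ';' ∉ h → ',' ∉ buf →
      ∃ pieces last, splitc ',' (buf ++ h) = pieces ++ [last] ∧
        h.foldl (pvScanStep d) (out, some bus, cur, buf)
          = (out, some bus, pieces.foldl (pvAddTok d) cur, last) := by
  induction h with
  | nil =>
    intro out bus cur buf _ hb
    exact ⟨[], buf, by simp [splitc_no_sep ',' buf hb], rfl⟩
  | cons a h' ih =>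
    intro out bus cur buf hs hb
    have hs1 : ¬ a = ';' := by simp at hs; exact fun e => hs.1 e.symm -- a ≠ ';'
    have hs2 : ';' ∉ h' := by simp at hs; exact hs.2
    simp only [List.foldl_cons]
    by_cases hac : a = ','
    · subst hac
      rw [show pvScanStep d (out, some bus, cur, buf) ','
            = (out, some bus, pvAddTok d cur buf, []) by simp [pvScanStep]]
      obtain ⟨pieces, last, e, hf⟩ := ih out bus (pvAddTok d cur buf) [] hs2 (by simp)
      refine ⟨buf :: pieces, last, ?_, ?_⟩
      · rw [splitc_append_sep ',' buf h' hb]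
        simp only [List.nil_append] at e
        rw [e]
        rfl
      · rw [hf]
        simp
    · rw [show pvScanStep d (out, some bus, cur, buf) a
            = (out, some bus, cur, buf ++ [a]) by
              simp [pvScanStep, hs1, hac]]
      obtain ⟨pieces, last, e, hf⟩ := ih out bus cur (buf ++ [a]) hs2
        (by simp [hb]; exact fun hh => hac hh.symm)
      refine ⟨pieces, last, ?_, hf⟩
      rw [← e]
      simp

-- outer run: the whole scan equals the canonical per-part fold
-- the scan of one part body (bus set by ':'), ending at ';' or at the end of input
theorem pvScanFinish (d : String) (hh : List Char) (hs : ';' ∉ hh)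
    (out : PySem.Dict String (List (Int × String))) (buf : List Char) :
    pvScanStep d (hh.foldl (pvScanStep d) (out, some buf, PySem.Dict.empty, [])) ';'
      = (out.insert (String.ofList (PySem.Chars.strip buf))
           ((splitc ',' hh).foldl (pvAddTok d) PySem.Dict.empty).items,
         none, PySem.Dict.empty, []) := by
  obtain ⟨pieces, last, e, hf⟩ := pvScanInner d hh out buf PySem.Dict.empty [] hs (by simp)
  rw [hf]
  simp only [pvScanStep, if_pos rfl]
  simp only [List.nil_append] at e
  rw [e, List.foldl_append]
  simp

theorem pvScanOuter (d : String) :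
    ∀ (n : Nat) (l : List Char), l.length ≤ n →
      ∀ (out : PySem.Dict String (List (Int × String))) (buf : List Char),
        ';' ∉ buf → ':' ∉ buf →
        ((l ++ [';']).foldl (pvScanStep d) (out, none, PySem.Dict.empty, buf)).1
          = (splitc ';' (buf ++ l)).foldl (pvPartC d) out := by
  intro n
  induction n with
  | zero =>
    intro l hl out buf h1 h2
    have hnil : l = [] := List.eq_nil_of_length_eq_zero (Nat.le_zero.mp hl)
    subst hnil
    simp only [List.nil_append, List.foldl_cons, List.foldl_nil, List.append_nil]
    rw [show pvScanStep d (out, none, PySem.Dict.empty, buf) ';'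
          = (out, none, PySem.Dict.empty, []) by simp [pvScanStep]]
    rw [splitc_no_sep ';' buf h1]
    simp [pvPartC_no_colon d out buf h2]
  | succ n ih =>
    intro l hl out buf h1 h2
    cases l with
    | nil =>
      simp only [List.nil_append, List.foldl_cons, List.foldl_nil, List.append_nil]
      rw [show pvScanStep d (out, none, PySem.Dict.empty, buf) ';'
            = (out, none, PySem.Dict.empty, []) by simp [pvScanStep]]
      rw [splitc_no_sep ';' buf h1]
      simp [pvPartC_no_colon d out buf h2]
    | cons a rest =>
      simp only [List.length_cons, Nat.add_le_add_iff_right] at hl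
      by_cases ha1 : a = ';'
      · subst ha1
        simp only [List.cons_append, List.foldl_cons]
        rw [show pvScanStep d (out, none, PySem.Dict.empty, buf) ';'
              = (out, none, PySem.Dict.empty, []) by simp [pvScanStep]]
        rw [ih rest hl out [] (by simp) (by simp)]
        rw [splitc_append_sep ';' buf rest h1]
        simp [pvPartC_no_colon d out buf h2]
      · by_cases ha2 : a = ':'
        · subst ha2
          simp only [List.cons_append, List.foldl_cons]
          rw [show pvScanStep d (out, none, PySem.Dict.empty, buf) ':'
                = (out, some buf, PySem.Dict.empty, []) by simp [pvScanStep]]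
          rcases e1 : split1 ';' rest with ⟨hh, r?⟩
          cases r? with
          | none =>
            obtain ⟨heq, hs⟩ := split1_none_decomp ';' rest hh e1
            rw [List.foldl_append]
            rw [show ∀ st, List.foldl (pvScanStep d) st [';'] = pvScanStep d st ';'
                  from fun _ => rfl]
            rw [pvScanFinish d rest hs out buf]
            rw [splitc_no_sep ';' (buf ++ ':' :: rest) (by simp [h1, hs])]
            simp only [List.foldl_cons, List.foldl_nil]
            rw [pvPartC_colon d out buf rest h2]
          | some r =>
            obtain ⟨heq, hs⟩ := split1_some_decomp ';' rest hh r e1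
            subst heq
            have hlen : r.length ≤ n := by
              simp at hl; omega
            rw [show (hh ++ ';' :: r) ++ [';'] = hh ++ ';' :: (r ++ [';']) by simp]
            rw [List.foldl_append]
            simp only [List.foldl_cons]
            rw [pvScanFinish d hh hs out buf]
            rw [ih r hlen _ [] (by simp) (by simp)]
            rw [show buf ++ ':' :: (hh ++ ';' :: r) = (buf ++ ':' :: hh) ++ ';' :: r by simp]
            rw [splitc_append_sep ';' (buf ++ ':' :: hh) r (by simp [h1, hs])]
            simp only [List.foldl_cons, List.nil_append]
            rw [pvPartC_colon d out buf hh h2]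
        · simp only [List.cons_append, List.foldl_cons]
          rw [show pvScanStep d (out, none, PySem.Dict.empty, buf) a
                = (out, none, PySem.Dict.empty, buf ++ [a]) by simp [pvScanStep, ha1, ha2]]
          rw [ih rest hl out (buf ++ [a])
                (by simp [h1]; exact fun hh => ha1 hh.symm)
                (by simp [h2]; exact fun hh => ha2 hh.symm)]
          rw [show (buf ++ [a]) ++ rest = buf ++ a :: rest by simp]

theorem B_eq_canon (m d : String) :
    parse_map_multibus_alt m d = (pvMultC d PySem.Dict.empty m.toList).items := by
  unfold parse_map_multibus_alt pvMultC
  rw [pvScanOuter d m.toList.length m.toList le_rfl PySem.Dict.empty [] (by simp) (by simp)]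
  rw [List.nil_append]

-- ---- port A equals the canonical form ----
theorem singleton_infix_iff (a : Char) (l : List Char) : [a] <:+: l ↔ a ∈ l := by
  constructor
  · intro h
    exact h.sublist.mem (List.mem_singleton_self a)
  · intro h
    obtain ⟨u, v, rfl⟩ := List.append_of_mem h
    exact ⟨u, v, by simp⟩

theorem isIn_colon (s : List Char) : PySem.Str.isIn ":" (String.ofList s) = true ↔ ':' ∈ s := by
  rw [PySem.Str.isIn_iff_infix]
  simp only [String.toList_ofList]
  rw [show (":" : String).toList = [':'] from rfl]
  exact singleton_infix_iff ':' s

theorem strip_ofList (s : List Char) :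
    PySem.Str.strip (String.ofList s) = String.ofList (PySem.Chars.strip s) := by
  unfold PySem.Str.strip
  simp

theorem ofList_eq_empty_iff (s : List Char) : String.ofList s = "" ↔ s = [] := by
  constructor
  · intro h
    have := congrArg String.toList h
    simpa using this
  · intro h; subst h; rfl

theorem splitMax1_str (c : Char) (cs : String) (s : List Char) (hc : cs.toList = [c]) :
    PySem.Str.splitMax? (String.ofList s) cs 1 =
      some (match split1 c s with
            | (h, none) => [String.ofList h]
            | (h, some r) => [String.ofList h, String.ofList r]) := by
  unfold PySem.Str.splitMax?
  rw [String.toList_ofList, hc, splitMax1_single c s]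
  rcases split1 c s with ⟨h, r?⟩
  cases r? <;> simp

theorem A_tok_eq (d : String) (acc : PySem.Dict Int String) (tok : List Char) :
    (let t := PySem.Str.strip (String.ofList tok);
     if t = "" then acc else pvTokStepA d acc t) = pvAddTok d acc tok := by
  rw [strip_ofList]
  by_cases he : PySem.Chars.strip tok = []
  · simp [pvAddTok, he, ofList_eq_empty_iff]
  · simp only [if_neg (fun h => he ((ofList_eq_empty_iff _).mp h))]
    unfold pvTokStepA pvAddTok
    rw [if_neg he]
    by_cases hc : ':' ∈ PySem.Chars.strip tok
    · rw [if_pos ((isIn_colon _).mpr hc)]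
      rcases e : split1 ':' (PySem.Chars.strip tok) with ⟨i, r?⟩
      cases r? with
      | none => exact absurd ((split1_none_decomp ':' _ i e).2) (by simp [hc])
      | some r =>
        rw [splitMax1_str ':' ":" _ rfl, e]
        simp only [strip_ofList]
        rw [show ∀ x : List Char, PySem.Int.ofStr? (String.ofList x) = PySem.Int.ofChars? x
              from fun x => by unfold PySem.Int.ofStr?; simp]
    · rw [if_neg (by rw [isIn_colon]; simp [hc])]
      rw [split1_none ':' _ hc]
      rw [show ∀ x : List Char, PySem.Int.ofStr? (String.ofList x) = PySem.Int.ofChars? x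
            from fun x => by unfold PySem.Int.ofStr?; simp]

theorem split_comma_ofList (ids : List Char) :
    (PySem.Str.split? (String.ofList ids) ",").getD []
      = (splitc ',' ids).map String.ofList := by
  unfold PySem.Str.split?
  rw [String.toList_ofList, show ("," : String).toList = [','] from rfl]
  unfold PySem.Chars.split?
  rw [if_neg (by simp), splitOn_single]
  rfl

theorem A_inner_eq (d : String) (ids : List Char) :
    parse_idmap_onebus (String.ofList ids) d
      = (splitc ',' ids).foldl (pvAddTok d) PySem.Dict.empty := by
  unfold parse_idmap_onebus
  by_cases hn : ids = []
  · subst hn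
    rw [if_pos rfl]
    rfl
  · rw [if_neg (fun h => hn ((ofList_eq_empty_iff _).mp h))]
    rw [split_comma_ofList, List.foldl_map]
    exact PySem.List.foldl_congr_mem _ _ _ _ (fun acc x _ => A_tok_eq d acc x)

theorem A_part_eq (d : String) (out : PySem.Dict String (List (Int × String))) (p : List Char) :
    (let part := PySem.Str.strip (String.ofList p);
     if part = "" then out else pvPartStepA d out part) = pvPartC d out p := by
  rw [strip_ofList]
  unfold pvPartC
  by_cases he : PySem.Chars.strip p = []
  · simp [he, ofList_eq_empty_iff]
  · simp only [if_neg (fun h => he ((ofList_eq_empty_iff _).mp h)), if_neg he]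
    unfold pvPartStepA
    by_cases hc : ':' ∈ PySem.Chars.strip p
    · rw [if_pos ((isIn_colon _).mpr hc)]
      rcases e : split1 ':' (PySem.Chars.strip p) with ⟨bus, r?⟩
      cases r? with
      | none => exact absurd ((split1_none_decomp ':' _ bus e).2) (by simp [hc])
      | some ids =>
        rw [splitMax1_str ':' ":" _ rfl, e]
        simp only [strip_ofList, A_inner_eq]
    · rw [if_neg (by rw [isIn_colon]; simp [hc])]
      rw [split1_none ':' _ hc]

theorem split_semi (m : String) :
    (PySem.Str.split? m ";").getD [] = (splitc ';' m.toList).map String.ofList := by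
  unfold PySem.Str.split?
  rw [show (";" : String).toList = [';'] from rfl]
  unfold PySem.Chars.split?
  rw [if_neg (by simp), splitOn_single]
  rfl

theorem A_eq_canon (m d : String) :
    parse_map_multibus m d = (pvMultC d PySem.Dict.empty m.toList).items := by
  unfold parse_map_multibus pvMultC
  by_cases hm : m = ""
  · subst hm
    rw [if_pos rfl]
    rfl
  · rw [if_neg hm]
    rw [split_semi m, List.foldl_map]
    exact congrArg PySem.Dict.items
      (PySem.List.foldl_congr_mem _ _ _ _ (fun acc x _ => A_part_eq d acc x))

theorem ports_eq (m d : String) : parse_map_multibus m d = parse_map_multibus_alt m d := by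
  rw [A_eq_canon, B_eq_canon]

-- ===== VERDICT (by name: the statement is the Claim_ definition above) =====
theorem parse_map_multibus_spec : Claim_equal_parse_map_multibus := by
  intro m d _ _
  unfold Spec_parse_map_multibus
  exact ports_eq m d
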